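-- pv_equiv track=rewrite | github.com/hemangbehl/Data-Structures-Algorithms_practice | leetcode_session2/stack_preToPostfix.py | preToPostfix
-- ===== SOURCE A (Python) =====
-- class Stack:
--
--     def __init__(self):
--         self.stack = []
--
--     def push(self, ele):
--         self.stack.append(ele)
--
--     def pop(self):
--         return self.stack.pop()
--
--     def top(self):
--         return self.stack[-1] #return last element
--
--     def isEmpty(self):
--         return self.stack == [] #empty list is []
--
--     def printStack(self):
--         return self.stack
--
-- def preToPostfix(expr):
--     stack = Stack()
--     expr = expr[::-1]
--
--     operator = set( [ '+','-','/','*','^' ] )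
--
--     for new in expr:
--         if new not in operator: #operand , char
--             stack.push(new)
--         else: # Operator
--             temp = stack.pop() + stack.pop() + new #concatenate strings
--             stack.push(temp)
--
--     #end of for
--     return stack.pop() #last element is the answer
-- ===== SOURCE B (Python) =====
-- def preToPostfix(expr):
--     ops = set('+-/*^')
--     st = []  # entries: (is_operand, text)
--     for c in expr:
--         st.append((c not in ops, c))
--         # reduce while the top three are operand, operand, operator (bottom-most of the three)
--         while len(st) >= 3 and st[-1][0] and st[-2][0] and not st[-3][0]:
--             r = st.pop()
--             l = st.pop()
--             o = st.pop()
--             st.append((True, l[1] + r[1] + o[1]))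
--     return st[0][1]
-- ===== Notes on version B (the rewrite author's own statement) =====
-- stated objective: alternative
-- what changed: B scans the expression forward with a shift-reduce stack of (is-operand, text) pairs, reducing operator/operand/operand triples as operands complete, instead of A's reversed scan with a plain string stack.
import Mathlib
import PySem

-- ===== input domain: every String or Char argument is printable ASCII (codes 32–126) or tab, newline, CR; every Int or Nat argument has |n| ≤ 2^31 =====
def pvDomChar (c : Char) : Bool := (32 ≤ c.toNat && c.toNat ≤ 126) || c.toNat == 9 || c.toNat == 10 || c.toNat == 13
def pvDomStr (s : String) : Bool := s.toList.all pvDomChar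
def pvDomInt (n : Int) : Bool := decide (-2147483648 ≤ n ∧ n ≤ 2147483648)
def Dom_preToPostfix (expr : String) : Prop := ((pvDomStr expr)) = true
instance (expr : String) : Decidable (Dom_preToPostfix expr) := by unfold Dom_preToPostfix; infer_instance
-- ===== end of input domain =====

-- B converts prefix to postfix by a forward shift-reduce pass instead of A's reversed scan with a stack;
-- return values agree on every input where A returns (equivalence is about return values; neither mutates its argument).

-- ===== PORT A =====
def opListA : List Char := ['+', '-', '/', '*', '^']   -- operator = set(['+','-','/','*','^']) (membership only)

-- one iteration of A's for-loop; stack held top-first, none = IndexError from stack.pop()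
def stepA (acc : Option (List String)) (c : Char) : Option (List String) :=
  match acc with
  | none => none
  | some st =>
    if c ∉ opListA then some (String.ofList [c] :: st)        -- stack.push(new)
    else match st with
      | a :: b :: rest => some ((a ++ b ++ String.ofList [c]) :: rest)  -- temp = pop() + pop() + new; push
      | _ => none                                          -- IndexError

def preToPostfix (expr : String) : String :=
  -- expr = expr[::-1]
  let rev : String := (PySem.Str.slice? expr none none (-1)).getD ""
  match rev.toList.foldl stepA (some []) with
  | some (t :: _) => t     -- return stack.pop()
  | _ => ""                -- IndexError (excluded by Pre_)

-- ===== PORT B =====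
def isOpB (c : Char) : Bool := c ∈ ['+', '-', '/', '*', '^']

-- the while-loop of Source B; stack held top-first (Python appends/pops at the end)
def reduceB : List (Bool × String) → List (Bool × String)
  | (true, r) :: (true, l) :: (false, o) :: t => reduceB ((true, l ++ r ++ o) :: t)
  | st => st
termination_by st => st.length
decreasing_by simp

def stepB (st : List (Bool × String)) (c : Char) : List (Bool × String) :=
  reduceB ((!isOpB c, String.ofList [c]) :: st)

def preToPostfix_alt (expr : String) : String :=
  match (expr.toList.foldl stepB []).getLast? with   -- st[0]
  | some (_, s) => s
  | none => ""                                       -- IndexError on empty (excluded by Pre_)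

-- ===== PRECONDITION & SPEC =====
-- Pre_ = exactly the inputs where A returns (does not raise IndexError): the expression is nonempty and
-- every operator has at least two operand slots available to its right: for each operator, the characters
-- after it number at least 2 more than twice the operators after it (a count condition, checked per suffix).
def suffOk : List Char → Bool
  | [] => true
  | c :: s => (!(isOpB c) || decide ((s.length : Int) - 2 * (s.countP isOpB : Int) ≥ 2)) && suffOk s

def Pre_preToPostfix (expr : String) : Prop := expr.toList ≠ [] ∧ suffOk expr.toList = true
instance (expr : String) : Decidable (Pre_preToPostfix expr) := by unfold Pre_preToPostfix; infer_instance

def pvWitness_preToPostfix : String := "+a*bc"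

def Spec_preToPostfix (expr : String) (out : String) : Prop := out = preToPostfix_alt expr
instance (expr : String) (out : String) : Decidable (Spec_preToPostfix expr out) := by unfold Spec_preToPostfix; infer_instance

-- ===== CLAIM (what is proved, stated in full; the proofs are below) =====
def Claim_equal_preToPostfix : Prop := ∀ (expr : String), Dom_preToPostfix expr → Pre_preToPostfix expr → Spec_preToPostfix expr (preToPostfix expr)

-- ===== LEMMAS AND PROOFS =====

-- common abstract pass: fold tokens (is-operand, text) from the right, combining at operators
def stepT (x : Bool × String) (acc : Option (List String)) : Option (List String) :=
  match x with
  | (true, s) => acc.map (s :: ·)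
  | (false, o) =>
    match acc with
    | some (a :: b :: r) => some ((a ++ b ++ o) :: r)
    | _ => none

def parsesT (ts : List (Bool × String)) : Option (List String) := ts.foldr stepT (some [])

def tokens (cs : List Char) : List (Bool × String) := cs.map (fun c => (!isOpB c, String.ofList [c]))

-- no stack (top-first) ever contains the reducible pattern operand,operand,operator
def BadFree (st : List (Bool × String)) : Prop :=
  ∀ x y z : String, ¬ ([(true, x), (true, y), (false, z)] <:+: st)

-- parsesT on cons / append
theorem parsesT_cons (x : Bool × String) (ts : List (Bool × String)) :
    parsesT (x :: ts) = stepT x (parsesT ts) := rfl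

theorem parsesT_append (xs ys : List (Bool × String)) :
    parsesT (xs ++ ys) = xs.foldr stepT (parsesT ys) := by
  simp [parsesT, List.foldr_append]

-- A's right-to-left stack pass computes parsesT of the token list
theorem foldrA_eq_parsesT (cs : List Char) :
    cs.foldr (fun c acc => stepA acc c) (some []) = parsesT (tokens cs) := by
  induction cs with
  | nil => rfl
  | cons c s ih =>
    simp only [List.foldr_cons, ih, tokens, List.map_cons, parsesT_cons]
    rw [show List.map (fun c => (!isOpB c, String.ofList [c])) s = tokens s from rfl]
    by_cases h : isOpB c
    · have h' : ¬ c ∉ opListA := by simp [isOpB, opListA] at h ⊢; tauto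
      cases hp : parsesT (tokens s) with
      | none => simp [stepA, stepT, h]
      | some l => cases l with
        | nil => simp [stepA, stepT, h, not_not.mp h']
        | cons a l' => cases l' <;> simp [stepA, stepT, h, not_not.mp h']
    · have h' : c ∉ opListA := by simp [isOpB, opListA] at h ⊢; tauto
      cases parsesT (tokens s) <;> simp [stepA, stepT, h, h']

-- one reduction keeps the parsesT value of (stack, rest of input)
theorem stepT_reduce (o l r : String) (acc : Option (List String)) :
    stepT (false, o) (stepT (true, l) (stepT (true, r) acc)) = stepT (true, l ++ r ++ o) acc := by
  cases acc with
  | none => rfl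
  | some m => simp [stepT]

theorem reduceB_parsesT (st : List (Bool × String)) (v : List (Bool × String)) :
    parsesT ((reduceB st).reverse ++ v) = parsesT (st.reverse ++ v) := by
  fun_induction reduceB st with
  | case1 r l o t ih =>
    rw [ih]
    simp only [List.reverse_cons, List.append_assoc, parsesT_append]
    congr 1
    show parsesT ([(true, l ++ r ++ o)] ++ v) = parsesT ([(false, o)] ++ ([(true, l)] ++ ([(true, r)] ++ v)))
    simp only [parsesT_append, List.foldr_cons, List.foldr_nil]
    exact (stepT_reduce o l r (parsesT v)).symm
  | case2 => rfl

theorem foldlB_parsesT (cs : List Char) (st : List (Bool × String)) :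
    parsesT ((cs.foldl stepB st).reverse) = parsesT (st.reverse ++ tokens cs) := by
  induction cs generalizing st with
  | nil => simp [tokens]
  | cons c s ih =>
    rw [List.foldl_cons, ih]
    show parsesT ((reduceB ((!isOpB c, String.ofList [c]) :: st)).reverse ++ tokens s) = _
    rw [reduceB_parsesT]
    simp [tokens]

-- BadFree is preserved by the while-loop and the whole fold
theorem badFree_tail {st : List (Bool × String)} (h : BadFree st) : BadFree st.tail := by
  intro x y z hin
  exact h x y z (hin.trans (List.tail_suffix st).isInfix)

theorem badFree_cons_of (a : Bool × String) (st : List (Bool × String))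
    (h : BadFree st)
    (htop : ∀ (x y z : String) (suf : List (Bool × String)), a :: st ≠ (true, x) :: (true, y) :: (false, z) :: suf) :
    BadFree (a :: st) := by
  intro x y z hin
  rcases hin with ⟨pre, suf, heq⟩
  cases pre with
  | nil =>
    simp only [List.nil_append, List.cons_append] at heq
    exact htop x y z suf heq.symm
  | cons b pre' =>
    simp only [List.cons_append, List.cons.injEq] at heq
    exact h x y z ⟨pre', suf, by simpa using heq.2⟩

theorem badFree_reduceB : ∀ st : List (Bool × String), BadFree st.tail → BadFree (reduceB st) := by
  intro st
  fun_induction reduceB st with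
  | case1 r l o t ih =>
    intro h
    apply ih
    simp only [List.tail_cons] at h ⊢
    exact badFree_tail (badFree_tail h)
  | case2 st hmatch =>
    intro h
    cases st with
    | nil => intro x y z hin; simp [List.infix_iff_prefix_suffix] at hin
    | cons a t =>
      exact badFree_cons_of a t (by simpa using h) (fun x y z suf heq => hmatch x y z suf heq)

theorem badFree_foldlB (cs : List Char) : ∀ st : List (Bool × String), BadFree st → BadFree (cs.foldl stepB st) := by
  induction cs with
  | nil => intro st h; simpa using h
  | cons c s ih =>
    intro st h
    rw [List.foldl_cons]
    exact ih _ (badFree_reduceB _ (by simpa using h))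

-- a reduced stack whose bottom entry is an operator cannot parse
theorem parsesT_none_of_op_head_aux : ∀ (n : Nat) (rv : List (Bool × String)), rv.length ≤ n →
    (∀ x y z : String, ¬ ([(false, z), (true, y), (true, x)] <:+: rv)) →
    ∀ o t, rv = (false, o) :: t → parsesT rv = none := by
  intro n
  induction n with
  | zero => intro rv hlen _ o t hrv; subst hrv; simp at hlen
  | succ n ih =>
    intro rv hlen hno o t hrv
    subst hrv
    have htail : ∀ x y z : String, ¬ ([(false, z), (true, y), (true, x)] <:+: t) := by
      intro x y z hin
      exact hno x y z (hin.trans (List.suffix_cons _ _).isInfix)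
    rw [parsesT_cons]
    rcases t with _ | ⟨⟨b1, s1⟩, u⟩
    · rfl
    · cases b1 with
      | false =>
        have : parsesT ((false, s1) :: u) = none := by
          apply ih _ (by simp at hlen ⊢; omega) htail s1 u rfl
        rw [this]; rfl
      | true =>
        have hutail : ∀ x y z : String, ¬ ([(false, z), (true, y), (true, x)] <:+: u) := by
          intro x y z hin
          exact htail x y z (hin.trans (List.suffix_cons _ _).isInfix)
        rcases u with _ | ⟨⟨b2, s2⟩, w⟩
        · rfl
        · cases b2 with
          | false =>
            have : parsesT ((false, s2) :: w) = none := by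
              apply ih _ (by simp at hlen ⊢; omega) hutail s2 w rfl
            rw [parsesT_cons, this]
            rfl
          | true =>
            exact absurd ⟨[], w, rfl⟩ (hno s2 s1 o)

theorem parsesT_none_of_op_head (rv : List (Bool × String))
    (hno : ∀ x y z : String, ¬ ([(false, z), (true, y), (true, x)] <:+: rv))
    (o : String) (t : List (Bool × String)) (hrv : rv = (false, o) :: t) : parsesT rv = none :=
  parsesT_none_of_op_head_aux rv.length rv le_rfl hno o t hrv

-- the count precondition guarantees success of the abstract pass
theorem suffOk_success : ∀ cs : List Char, suffOk cs = true →
    ∃ l, parsesT (tokens cs) = some l ∧ (l.length : Int) = (cs.length : Int) - 2 * (cs.countP isOpB : Int) ∧ (cs ≠ [] → l ≠ []) := by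
  intro cs
  induction cs with
  | nil => intro _; exact ⟨[], rfl, by simp, by simp⟩
  | cons c s ih =>
    intro h
    simp only [suffOk, Bool.and_eq_true, Bool.or_eq_true, Bool.not_eq_true', decide_eq_true_eq] at h
    obtain ⟨hc, hs⟩ := h
    obtain ⟨l, hp, hlen, _⟩ := ih hs
    by_cases hop : isOpB c
    · have hge : (s.length : Int) - 2 * (s.countP isOpB : Int) ≥ 2 := by
        rcases hc with hc | hc
        · rw [hop] at hc; cases hc
        · exact hc
      have hl2 : 2 ≤ l.length := by omega
      rcases l with _ | ⟨a, l'⟩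
      · simp at hl2
      rcases l' with _ | ⟨b, l''⟩
      · simp at hl2
      refine ⟨(a ++ b ++ String.ofList [c]) :: l'', ?_, ?_, by simp⟩
      · simp only [tokens, List.map_cons, parsesT_cons, tokens] at hp ⊢
        rw [hp]
        simp [stepT, hop]
      · simp only [List.length_cons, List.countP_cons, hop] at hlen ⊢
        push_cast at hlen ⊢
        omega
    · refine ⟨String.ofList [c] :: l, ?_, ?_, by simp⟩
      · simp only [tokens, List.map_cons, parsesT_cons, tokens] at hp ⊢
        rw [hp]
        simp [stepT, hop]
      · simp only [List.length_cons, List.countP_cons, hop] at hlen ⊢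
        push_cast at hlen ⊢
        omega

theorem preToPostfix_spec : Claim_equal_preToPostfix := by
  unfold Claim_equal_preToPostfix
  intro expr _ hpre
  obtain ⟨hne, hok⟩ := hpre
  obtain ⟨l, hp, _, hlne⟩ := suffOk_success expr.toList hok
  rcases l with _ | ⟨p, m⟩
  · exact absurd rfl (hlne hne)
  -- A returns p
  have hA : preToPostfix expr = p := by
    unfold preToPostfix
    rw [PySem.Str.slice?_none_none_neg_one]
    simp only [Option.getD_some, String.toList_ofList, List.foldl_reverse]
    rw [show (List.foldr (fun x y => stepA y x) (some []) expr.toList) =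
          List.foldr (fun c acc => stepA acc c) (some []) expr.toList from rfl,
        foldrA_eq_parsesT, hp]
  -- B returns p
  have hBF : BadFree (expr.toList.foldl stepB []) := by
    apply badFree_foldlB
    intro x y z hin
    rcases hin with ⟨pre, suf, heq⟩
    simp at heq
  have hParse : parsesT ((expr.toList.foldl stepB []).reverse) = some (p :: m) := by
    rw [foldlB_parsesT]
    simpa using hp
  have hno : ∀ x y z : String,
      ¬ ([(false, z), (true, y), (true, x)] <:+: (expr.toList.foldl stepB []).reverse) := by
    intro x y z hin
    exact hBF x y z (List.reverse_infix.mp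
      (show ([(true, x), (true, y), (false, z)] : List (Bool × String)).reverse <:+:
            (expr.toList.foldl stepB []).reverse from by simpa using hin))
  have hB : preToPostfix_alt expr = p := by
    unfold preToPostfix_alt
    rw [← List.head?_reverse]
    rcases hF : (expr.toList.foldl stepB []).reverse with _ | ⟨⟨b, s⟩, t⟩
    · rw [hF] at hParse; simp [parsesT] at hParse
    · cases b with
      | false =>
        have := parsesT_none_of_op_head _ (hF ▸ hno) s t rfl
        rw [hF, this] at hParse; cases hParse
      | true =>
        rw [hF, parsesT_cons] at hParse
        cases ht : parsesT t with
        | none => rw [ht] at hParse; cases hParse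
        | some m' =>
          rw [ht] at hParse
          simp only [stepT, Option.map_some, Option.some.injEq, List.cons.injEq] at hParse
          simp [hParse.1]
  show preToPostfix expr = preToPostfix_alt expr
  rw [hA, hB]
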